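-- pv_equiv track=rewrite | github.com/p-patil/Music-Player-Basic | parser.py | _parse_all_args
-- ===== SOURCE A (Python) =====
-- def _parse_all_args(tokens, sanitize_quotes = False):
--     """ Same as _parse_args, but accepts any options, not just song columns. If the sanitize_quotes
--     flag is set, removes (initial or terminal) quotes when found.
--
--     @param tokens: list(str)
--     @param sanitize_quotes: bool
--
--     @return: dict(str -> str)
--     """
--     parsed_args = {}
--
--     if tokens[0][0] == "-": # Options are provided
--         i = 0
--         while i < len(tokens):
--             in_quote = False
--             j = i + 1
--             while j < len(tokens) and (tokens[j][0] != "-" or in_quote):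
--                 if not in_quote and tokens[j][0] == "\"":
--                     in_quote = True
--
--                     if sanitize_quotes:
--                         tokens[j] = tokens[j][1 :]
--                 elif in_quote and tokens[j][-1] == "\"":
--                     in_quote = False
--
--                     if sanitize_quotes:
--                         tokens[j] = tokens[j][: -1]
--
--                 j += 1
--
--             if in_quote: # Unclosed quote
--                 return None
--
--             option, argument = tokens[i][1 :], " ".join(tokens[i + 1 : j])
--             parsed_args[option] = argument
--             i = j
--
--         return parsed_args
--     else:
--         return None
-- ===== SOURCE B (Python) =====
-- def _parse_all_args(tokens, sanitize_quotes = False):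
--     """Single flat pass: maintain the current option, an argument accumulator and an
--     in_quote flag; finalize an option whenever the next option token appears.
--     Return-value equivalent to A; does not mutate `tokens` (A rewrites quoted tokens
--     in place when sanitize_quotes is set)."""
--     if tokens[0][0] != "-":
--         return None
--     parsed_args = {}
--     option = None
--     acc = []
--     in_quote = False
--     for t in tokens:
--         if t[0] == "-" and not in_quote:
--             if option is not None:
--                 parsed_args[option] = " ".join(acc)
--             option = t[1:]
--             acc = []
--         else:
--             if not in_quote and t[0] == "\"":
--                 in_quote = True
--                 if sanitize_quotes:
--                     t = t[1:]
--             elif in_quote and t[-1] == "\"":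
--                 in_quote = False
--                 if sanitize_quotes:
--                     t = t[:-1]
--             acc.append(t)
--     if in_quote:
--         return None
--     if option is not None:
--         parsed_args[option] = " ".join(acc)
--     return parsed_args
-- ===== Notes on version B (the rewrite author's own statement) =====
-- stated objective: simpler
-- what changed: Replaces A's nested index-based while loops with in-place token mutation by a single flat for-pass over the tokens that maintains (current option, argument accumulator, in_quote) state and builds each argument without mutating the input list.
import Mathlib
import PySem

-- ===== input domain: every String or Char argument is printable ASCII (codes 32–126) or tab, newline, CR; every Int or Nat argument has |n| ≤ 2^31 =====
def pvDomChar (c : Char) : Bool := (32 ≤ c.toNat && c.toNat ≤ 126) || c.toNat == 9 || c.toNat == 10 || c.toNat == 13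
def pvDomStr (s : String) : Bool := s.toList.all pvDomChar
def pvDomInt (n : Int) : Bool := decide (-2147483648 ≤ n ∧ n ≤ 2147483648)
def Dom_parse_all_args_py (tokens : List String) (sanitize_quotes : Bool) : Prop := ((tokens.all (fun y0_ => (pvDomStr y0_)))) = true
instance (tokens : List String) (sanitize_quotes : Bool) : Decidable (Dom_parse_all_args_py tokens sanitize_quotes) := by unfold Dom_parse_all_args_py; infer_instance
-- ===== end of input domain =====

-- B re-parses the token list in ONE flat forward pass (option/accumulator/in_quote state machine)
-- instead of A's nested index loops with in-place token mutation; return-value equivalence only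
-- (A mutates `tokens` in place when sanitize_quotes is set, B does not).


-- ===== PORT A =====
-- A's inner `while` loop: scans j forward, mutating the token list in place (List.set)
-- when sanitize_quotes strips a quote char; returns (updated tokens, final j, in_quote).
-- tokens[j][0] / tokens[j][-1] are PySem.Str.pyGet? (none exactly where Python raises
-- IndexError on an empty-string token; those inputs are outside Pre_).
-- (fuel is a mechanical totalization device for the while loops: j — resp. i — strictly
-- increases each iteration, so the stated fuel is never exhausted before the loop exits)
def pvA_inner (sq : Bool) (fuel : Nat) (tokens : List String) (j : Nat) (q : Bool) :
    List String × Nat × Bool :=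
  match fuel with
  | 0 => (tokens, j, q)
  | fuel + 1 =>
    if j < tokens.length then
      let tj := tokens.getD j ""
      if PySem.Str.pyGet? tj 0 ≠ some '-' ∨ q = true then
        if q = false ∧ PySem.Str.pyGet? tj 0 = some '"' then
          -- tokens[j] = tokens[j][1:] when sanitize_quotes
          pvA_inner sq fuel (if sq then tokens.set j (PySem.Str.slice tj (some 1) none) else tokens) (j + 1) true
        else if q = true ∧ PySem.Str.pyGet? tj (-1) = some '"' then
          -- tokens[j] = tokens[j][:-1] when sanitize_quotes
          pvA_inner sq fuel (if sq then tokens.set j (PySem.Str.slice tj none (some (-1))) else tokens) (j + 1) false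
        else
          pvA_inner sq fuel tokens (j + 1) q
      else (tokens, j, q)
    else (tokens, j, q)

-- A's outer `while` loop over option positions i
def pvA_outer (sq : Bool) (fuel : Nat) (tokens : List String) (i : Nat)
    (parsed : PySem.Dict String String) : Option (List (String × String)) :=
  match fuel with
  | 0 => some parsed.items
  | fuel + 1 =>
    if i < tokens.length then
      let r := pvA_inner sq tokens.length tokens (i + 1) false
      if r.2.2 then none  -- unclosed quote
      else
        -- option, argument = tokens[i][1:], " ".join(tokens[i+1:j])
        let option := PySem.Str.slice (r.1.getD i "") (some 1) none
        let argument := PySem.Str.join " " (PySem.List.slice r.1 (some ((i : Int) + 1)) (some (r.2.1 : Int)))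
        pvA_outer sq fuel r.1 r.2.1 (parsed.insert option argument)
    else some parsed.items

def parse_all_args_py (tokens : List String) (sanitize_quotes : Bool) :
    Option (List (String × String)) :=
  if PySem.Str.pyGet? (tokens.getD 0 "") 0 = some '-' then
    pvA_outer sanitize_quotes (tokens.length + 1) tokens 0 PySem.Dict.empty
  else none

-- ===== PORT B =====
-- one step of B's single `for t in tokens` loop; state = (parsed_args, option, acc, in_quote)
def pvB_step (sq : Bool)
    (st : PySem.Dict String String × Option String × List String × Bool) (t : String) :
    PySem.Dict String String × Option String × List String × Bool :=
  match st with
  | (res, opt, acc, q) =>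
    if PySem.Str.pyGet? t 0 = some '-' ∧ q = false then
      (match opt with
       | none => res
       | some o => res.insert o (PySem.Str.join " " acc),
       some (PySem.Str.slice t (some 1) none), [], q)
    else if q = false ∧ PySem.Str.pyGet? t 0 = some '"' then
      (res, opt, acc ++ [if sq then PySem.Str.slice t (some 1) none else t], true)
    else if q = true ∧ PySem.Str.pyGet? t (-1) = some '"' then
      (res, opt, acc ++ [if sq then PySem.Str.slice t none (some (-1)) else t], false)
    else
      (res, opt, acc ++ [t], q)

-- B's tail after the loop: fail on an unclosed quote, flush the last option
def pvB_finish (st : PySem.Dict String String × Option String × List String × Bool) :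
    Option (List (String × String)) :=
  if st.2.2.2 then none
  else
    some (match st.2.1 with
          | none => st.1
          | some o => st.1.insert o (PySem.Str.join " " st.2.2.1)).items

def parse_all_args_py_alt (tokens : List String) (sanitize_quotes : Bool) :
    Option (List (String × String)) :=
  if PySem.Str.pyGet? (tokens.getD 0 "") 0 ≠ some '-' then none
  else
    pvB_finish (tokens.foldl (pvB_step sanitize_quotes) (PySem.Dict.empty, none, [], false))

-- ===== PRECONDITION & SPEC =====
-- Pre_ excludes exactly the inputs on which A raises IndexError: the empty list, an
-- empty first token, and — once the options guard passes — any empty-string token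
-- (A indexes t[0]/t[-1] on every scanned token).
def Pre_parse_all_args_py (tokens : List String) (sanitize_quotes : Bool) : Prop :=
  tokens ≠ [] ∧ tokens.getD 0 "" ≠ "" ∧
    (PySem.Str.pyGet? (tokens.getD 0 "") 0 = some '-' → ∀ t ∈ tokens, t ≠ "")
instance (tokens : List String) (sanitize_quotes : Bool) :
    Decidable (Pre_parse_all_args_py tokens sanitize_quotes) := by
  unfold Pre_parse_all_args_py; infer_instance

def pvWitness_parse_all_args_py : List String × Bool := (["-title", "\"a", "b\"", "-n"], true)

def Spec_parse_all_args_py (tokens : List String) (sanitize_quotes : Bool) (out : Option (List (String × String))) : Prop := out = parse_all_args_py_alt tokens sanitize_quotes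
instance (tokens : List String) (sanitize_quotes : Bool) (out : Option (List (String × String))) : Decidable (Spec_parse_all_args_py tokens sanitize_quotes out) := by unfold Spec_parse_all_args_py; infer_instance

-- ===== CLAIM (what is proved, stated in full; the proofs are below) =====
def Claim_equal_parse_all_args_py : Prop := ∀ (tokens : List String) (sanitize_quotes : Bool), Dom_parse_all_args_py tokens sanitize_quotes → Pre_parse_all_args_py tokens sanitize_quotes → Spec_parse_all_args_py tokens sanitize_quotes (parse_all_args_py tokens sanitize_quotes)

-- ===== LEMMAS AND PROOFS =====

-- j only moves forward and mutation preserves the length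
lemma pvA_inner_facts (sq : Bool) (fuel : Nat) (tokens : List String) (j : Nat) (q : Bool) :
    j ≤ (pvA_inner sq fuel tokens j q).2.1 ∧ (pvA_inner sq fuel tokens j q).1.length = tokens.length := by
  fun_induction pvA_inner sq fuel tokens j q <;>
    simp_all [apply_ite List.length, List.length_set] <;> omega

-- the outer loop's exit is the same at fuel 0 and at i ≥ len
lemma pvA_outer_exit (sq : Bool) (fuel : Nat) (tokens : List String) (i : Nat)
    (parsed : PySem.Dict String String) (h : ¬ i < tokens.length) :
    pvA_outer sq fuel tokens i parsed = some parsed.items := by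
  cases fuel <;> simp [pvA_outer, h]

-- small list facts used by the simulation
lemma pvGetD_set_ne (l : List String) (j m : Nat) (v : String) (h : m ≠ j) :
    (l.set j v).getD m "" = l.getD m "" := by
  simp [List.getD, List.getElem?_set_ne (Ne.symm h)]

lemma pvGetD_set_self (l : List String) (j : Nat) (v : String) (h : j < l.length) :
    (l.set j v).getD j "" = v := by
  simp [List.getD, h]

lemma pvGetD_eq_of_drop_eq (l l' : List String) (k : Nat) (h : l.drop k = l'.drop k)
    (hk : k < l.length) (hk' : k < l'.length) :
    l.getD k "" = l'.getD k "" := by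
  rw [List.getD_eq_getElem _ _ hk, List.getD_eq_getElem _ _ hk']
  have h0 : (l.drop k)[0]'(by simpa using hk) = (l'.drop k)[0]'(by simpa using hk') := by
    simp_rw [h]
  simpa using h0

-- SIMULATION of A's inner loop by B's flat fold over the scanned segment:
-- the fold over tokens[j:j'] from state (res, opt, acc, q) appends exactly the
-- sanitized segment tokens'[j:j'] to acc and ends in state q'.
lemma pvInner_sim (sq : Bool) (fuel : Nat) (tokens : List String) (j : Nat) (q : Bool)
    (hj : j ≤ tokens.length) (hfl : tokens.length - j ≤ fuel) :
    (pvA_inner sq fuel tokens j q).2.1 ≤ tokens.length ∧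
    (pvA_inner sq fuel tokens j q).1.drop (pvA_inner sq fuel tokens j q).2.1 = tokens.drop (pvA_inner sq fuel tokens j q).2.1 ∧
    (∀ m, m < j → (pvA_inner sq fuel tokens j q).1.getD m "" = tokens.getD m "") ∧
    ((pvA_inner sq fuel tokens j q).2.2 = true → (pvA_inner sq fuel tokens j q).2.1 = tokens.length) ∧
    ((pvA_inner sq fuel tokens j q).2.2 = false →
      (pvA_inner sq fuel tokens j q).2.1 = tokens.length ∨
      ((pvA_inner sq fuel tokens j q).2.1 < tokens.length ∧
        PySem.Str.pyGet? (tokens.getD (pvA_inner sq fuel tokens j q).2.1 "") 0 = some '-')) ∧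
    (∀ res opt acc,
      List.foldl (pvB_step sq) (res, opt, acc, q)
          ((tokens.drop j).take ((pvA_inner sq fuel tokens j q).2.1 - j))
        = (res, opt,
           acc ++ ((pvA_inner sq fuel tokens j q).1.drop j).take ((pvA_inner sq fuel tokens j q).2.1 - j),
           (pvA_inner sq fuel tokens j q).2.2)) := by
  fun_induction pvA_inner sq fuel tokens j q
  case case1 tokens j q =>
    -- fuel exhausted: only reachable with j = len(tokens)
    have hje : j = tokens.length := by omega
    refine ⟨by omega, rfl, fun m hm => rfl, fun _ => hje, fun _ => Or.inl hje,
      fun res opt acc => by simp [List.drop_of_length_le (by omega : tokens.length ≤ j)]⟩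
  case case2 tokens j q fuel h tj hcond hbr ih =>
    obtain ⟨hqeq, hq0⟩ := hbr
    subst hqeq
    have htj : tj = tokens.getD j "" := rfl
    set t1 := (if sq = true then tokens.set j (PySem.Str.slice tj (some 1) none) else tokens) with ht1
    have hlen1 : t1.length = tokens.length := by rw [ht1]; split <;> simp
    have hdropgt : ∀ m, j < m → t1.drop m = tokens.drop m := by
      intro m hm; rw [ht1]; split
      · exact List.drop_set_of_lt hm
      · rfl
    have hgetne : ∀ m, m ≠ j → t1.getD m "" = tokens.getD m "" := by
      intro m hm; rw [ht1]; split
      · exact pvGetD_set_ne tokens j m _ hm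
      · rfl
    have hget1j : t1.getD j "" = (if sq = true then PySem.Str.slice tj (some 1) none else tj) := by
      rw [ht1]; split
      · exact pvGetD_set_self tokens j _ h
      · exact htj.symm
    obtain ⟨ih0, ihdrop, ihgetD, ihqt, ihqf, ihfold⟩ := ih (by omega) (by omega)
    obtain ⟨hf1, hf2⟩ := pvA_inner_facts sq fuel t1 (j + 1) true
    refine ⟨by omega, ?_, ?_, ?_, ?_, ?_⟩
    · rw [ihdrop]; exact hdropgt _ (by omega)
    · intro m hm
      rw [ihgetD m (by omega)]; exact hgetne m (by omega)
    · intro hq; have := ihqt hq; omega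
    · intro hq
      rcases ihqf hq with h1 | ⟨h2, h3⟩
      · left; omega
      · right
        refine ⟨by omega, ?_⟩
        rw [← hgetne _ (by omega)]; exact h3
    · intro res opt acc
      have hq0' : PySem.List.pyGet? tj.toList 0 = some '"' := by simpa using hq0
      have hstep : pvB_step sq (res, opt, acc, false) tj
          = (res, opt, acc ++ [if sq = true then PySem.Str.slice tj (some 1) none else tj], true) := by
        simp [pvB_step, hq0']
      have hdj : tokens.drop j = tj :: tokens.drop (j + 1) := by
        rw [List.drop_eq_getElem_cons h]
        congr 1
        exact (htj.trans (List.getD_eq_getElem tokens "" h)).symm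
      have hsub : (pvA_inner sq fuel t1 (j + 1) true).2.1 - j
          = ((pvA_inner sq fuel t1 (j + 1) true).2.1 - (j + 1)) + 1 := by omega
      have hjr : j < (pvA_inner sq fuel t1 (j + 1) true).1.length := by omega
      have hrdj : (pvA_inner sq fuel t1 (j + 1) true).1.drop j
          = (if sq = true then PySem.Str.slice tj (some 1) none else tj) :: (pvA_inner sq fuel t1 (j + 1) true).1.drop (j + 1) := by
        rw [List.drop_eq_getElem_cons hjr]
        congr 1
        calc (pvA_inner sq fuel t1 (j + 1) true).1[j]
            = (pvA_inner sq fuel t1 (j + 1) true).1.getD j "" := (List.getD_eq_getElem _ "" hjr).symm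
          _ = t1.getD j "" := ihgetD j (by omega)
          _ = _ := hget1j
      rw [hdj, hsub, List.take_succ_cons, List.foldl_cons, hstep,
        ← hdropgt (j + 1) (by omega), ihfold, hrdj, List.take_succ_cons]
      simp
  case case3 tokens j q fuel h tj hcond hbr1 hbr ih =>
    obtain ⟨hqeq, hqm1⟩ := hbr
    subst hqeq
    have htj : tj = tokens.getD j "" := rfl
    set t1 := (if sq = true then tokens.set j (PySem.Str.slice tj none (some (-1))) else tokens) with ht1
    have hlen1 : t1.length = tokens.length := by rw [ht1]; split <;> simp
    have hdropgt : ∀ m, j < m → t1.drop m = tokens.drop m := by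
      intro m hm; rw [ht1]; split
      · exact List.drop_set_of_lt hm
      · rfl
    have hgetne : ∀ m, m ≠ j → t1.getD m "" = tokens.getD m "" := by
      intro m hm; rw [ht1]; split
      · exact pvGetD_set_ne tokens j m _ hm
      · rfl
    have hget1j : t1.getD j "" = (if sq = true then PySem.Str.slice tj none (some (-1)) else tj) := by
      rw [ht1]; split
      · exact pvGetD_set_self tokens j _ h
      · exact htj.symm
    obtain ⟨ih0, ihdrop, ihgetD, ihqt, ihqf, ihfold⟩ := ih (by omega) (by omega)
    obtain ⟨hf1, hf2⟩ := pvA_inner_facts sq fuel t1 (j + 1) false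
    refine ⟨by omega, ?_, ?_, ?_, ?_, ?_⟩
    · rw [ihdrop]; exact hdropgt _ (by omega)
    · intro m hm
      rw [ihgetD m (by omega)]; exact hgetne m (by omega)
    · intro hq; have := ihqt hq; omega
    · intro hq
      rcases ihqf hq with h1 | ⟨h2, h3⟩
      · left; omega
      · right
        refine ⟨by omega, ?_⟩
        rw [← hgetne _ (by omega)]; exact h3
    · intro res opt acc
      have hqm1' : PySem.List.pyGet? tj.toList (-1) = some '"' := by simpa using hqm1
      have hstep : pvB_step sq (res, opt, acc, true) tj
          = (res, opt, acc ++ [if sq = true then PySem.Str.slice tj none (some (-1)) else tj], false) := by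
        simp [pvB_step, hqm1']
      have hdj : tokens.drop j = tj :: tokens.drop (j + 1) := by
        rw [List.drop_eq_getElem_cons h]
        congr 1
        exact (htj.trans (List.getD_eq_getElem tokens "" h)).symm
      have hsub : (pvA_inner sq fuel t1 (j + 1) false).2.1 - j
          = ((pvA_inner sq fuel t1 (j + 1) false).2.1 - (j + 1)) + 1 := by omega
      have hjr : j < (pvA_inner sq fuel t1 (j + 1) false).1.length := by omega
      have hrdj : (pvA_inner sq fuel t1 (j + 1) false).1.drop j
          = (if sq = true then PySem.Str.slice tj none (some (-1)) else tj) :: (pvA_inner sq fuel t1 (j + 1) false).1.drop (j + 1) := by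
        rw [List.drop_eq_getElem_cons hjr]
        congr 1
        calc (pvA_inner sq fuel t1 (j + 1) false).1[j]
            = (pvA_inner sq fuel t1 (j + 1) false).1.getD j "" := (List.getD_eq_getElem _ "" hjr).symm
          _ = t1.getD j "" := ihgetD j (by omega)
          _ = _ := hget1j
      rw [hdj, hsub, List.take_succ_cons, List.foldl_cons, hstep,
        ← hdropgt (j + 1) (by omega), ihfold, hrdj, List.take_succ_cons]
      simp
  case case4 tokens j q fuel h tj hcond hbr1 hbr2 ih =>
    -- plain argument token
    have htj : tj = tokens.getD j "" := rfl
    obtain ⟨ih0, ihdrop, ihgetD, ihqt, ihqf, ihfold⟩ := ih (by omega) (by omega)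
    obtain ⟨hf1, hf2⟩ := pvA_inner_facts sq fuel tokens (j + 1) q
    refine ⟨ih0, ihdrop, fun m hm => ihgetD m (by omega), ihqt, ihqf, ?_⟩
    intro res opt acc
    have hdj : tokens.drop j = tj :: tokens.drop (j + 1) := by
      rw [List.drop_eq_getElem_cons h]
      congr 1
      exact (htj.trans (List.getD_eq_getElem tokens "" h)).symm
    have hstep : pvB_step sq (res, opt, acc, q) tj = (res, opt, acc ++ [tj], q) := by
      rcases q <;> simp_all [pvB_step]
    have hsub : (pvA_inner sq fuel tokens (j + 1) q).2.1 - j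
        = ((pvA_inner sq fuel tokens (j + 1) q).2.1 - (j + 1)) + 1 := by omega
    have hjr : j < (pvA_inner sq fuel tokens (j + 1) q).1.length := by omega
    have hrdj : (pvA_inner sq fuel tokens (j + 1) q).1.drop j
        = tj :: (pvA_inner sq fuel tokens (j + 1) q).1.drop (j + 1) := by
      rw [List.drop_eq_getElem_cons hjr]
      congr 1
      calc (pvA_inner sq fuel tokens (j + 1) q).1[j]
          = (pvA_inner sq fuel tokens (j + 1) q).1.getD j "" := (List.getD_eq_getElem _ "" hjr).symm
        _ = tokens.getD j "" := ihgetD j (by omega)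
        _ = tj := htj.symm
    rw [hdj, hsub, List.take_succ_cons, List.foldl_cons, hstep, ihfold, hrdj,
      List.take_succ_cons]
    simp
  case case5 tokens j q fuel h tj hcond =>
    -- exit: tokens[j] starts a new option and we are not inside a quote
    push Not at hcond
    obtain ⟨hdash, hqf⟩ := hcond
    refine ⟨by omega, rfl, fun m hm => rfl, fun hq => absurd hq (by simp [hqf]),
      fun _ => Or.inr ⟨h, hdash⟩, fun res opt acc => by simp⟩
  case case6 tokens j q fuel h =>
    -- exit: j = len(tokens)
    have hje : j = tokens.length := by omega
    refine ⟨by omega, rfl, fun m hm => rfl, fun _ => hje, fun _ => Or.inl hje,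
      fun res opt acc => by simp [List.drop_of_length_le (by omega : tokens.length ≤ j)]⟩

-- SIMULATION of A's outer loop: from an option position i, A's remaining work equals
-- B's fold over the remaining tokens followed by B's final flush.
lemma pvOuter_sim (sq : Bool) : ∀ (fuel : Nat) (tokens : List String) (i : Nat)
    (parsed : PySem.Dict String String), tokens.length - i ≤ fuel → i < tokens.length →
    PySem.Str.pyGet? (tokens.getD i "") 0 = some '-' →
    pvA_outer sq fuel tokens i parsed =
      pvB_finish (List.foldl (pvB_step sq)
        (parsed, some (PySem.Str.slice (tokens.getD i "") (some 1) none), [], false)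
        (tokens.drop (i + 1))) := by
  intro fuel
  induction fuel with
  | zero => intro tokens i parsed hN hi hopt; omega
  | succ fuel IH =>
    intro tokens i parsed hN hi hopt
    rw [pvA_outer, if_pos hi]
    obtain ⟨hf1, hf2⟩ := pvA_inner_facts sq tokens.length tokens (i + 1) false
    obtain ⟨hs0, hsdrop, hsgetD, hsqt, hsqf, hsfold⟩ :=
      pvInner_sim sq tokens.length tokens (i + 1) false (by omega) (by omega)
    set r := pvA_inner sq tokens.length tokens (i + 1) false with hr
    have hsplit : tokens.drop (i + 1)
        = ((tokens.drop (i + 1)).take (r.2.1 - (i + 1))) ++ tokens.drop r.2.1 := by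
      conv_lhs => rw [← List.take_append_drop (r.2.1 - (i + 1)) (tokens.drop (i + 1))]
      congr 1
      rw [List.drop_drop]
      congr 1
      omega
    rw [hsplit, List.foldl_append, hsfold]
    have hgi : r.1.getD i "" = tokens.getD i "" := hsgetD i (by omega)
    have hcast : ((i : Int) + 1) = ((i + 1 : Nat) : Int) := by push_cast; ring
    by_cases hq : r.2.2
    · rw [if_pos hq, hsqt hq, List.drop_length]
      simp [pvB_finish, hq]
    · have hqf : r.2.2 = false := by simpa using hq
      rw [if_neg hq, hqf]
      rcases hsqf hqf with hlen | ⟨hlt, hdash⟩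
      · -- the last option: the scan ran to the end of the list
        rw [hlen, List.drop_length, pvA_outer_exit sq fuel r.1 tokens.length _
          (by omega : ¬ tokens.length < r.1.length)]
        simp only [List.foldl_nil, pvB_finish, Bool.false_eq_true, if_false]
        rw [hgi, hcast, PySem.List.slice_natCast]
        simp
      · -- a further option starts at index r.2.1
        have hgr : r.1.getD r.2.1 "" = tokens.getD r.2.1 "" :=
          pvGetD_eq_of_drop_eq r.1 tokens r.2.1 hsdrop (by omega) hlt
        have hnext : tokens.drop r.2.1 = tokens.getD r.2.1 "" :: tokens.drop (r.2.1 + 1) := by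
          rw [List.drop_eq_getElem_cons hlt]
          congr 1
          exact (List.getD_eq_getElem _ "" hlt).symm
        have hdash' : PySem.List.pyGet? (tokens.getD r.2.1 "").toList 0 = some '-' := by
          simpa using hdash
        have hdrop1 : r.1.drop (r.2.1 + 1) = tokens.drop (r.2.1 + 1) := by
          have h1 := congrArg (List.drop 1) hsdrop
          simpa [List.drop_drop, Nat.add_comm] using h1
        rw [IH r.1 r.2.1 _ (by omega) (by omega) (by rw [hgr]; exact hdash)]
        rw [hnext, List.foldl_cons]
        have hstep : ∀ acc0 : List String, pvB_step sq
            (parsed, some (PySem.Str.slice (tokens.getD i "") (some 1) none), acc0, false)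
            (tokens.getD r.2.1 "")
            = (parsed.insert (PySem.Str.slice (tokens.getD i "") (some 1) none)
                 (PySem.Str.join " " acc0),
               some (PySem.Str.slice (tokens.getD r.2.1 "") (some 1) none), [], false) := by
          intro acc0
          simp only [pvB_step]
          rw [if_pos ⟨hdash, trivial⟩]
        rw [hstep]
        rw [hgi, hgr, hdrop1, hcast, PySem.List.slice_natCast]
        simp

-- ===== VERDICT (by name: the statement is the Claim_ definition above) =====
theorem parse_all_args_py_spec : Claim_equal_parse_all_args_py := by
  intro tokens sq _hdom _hpre
  unfold Spec_parse_all_args_py parse_all_args_py parse_all_args_py_alt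
  by_cases hg : PySem.Str.pyGet? (tokens.getD 0 "") 0 = some '-'
  · rw [if_pos hg, if_neg (by simpa using hg)]
    match tokens, hg with
    | t0 :: rest, hg =>
      have hg0 : PySem.List.pyGet? t0.toList 0 = some '-' := by simpa using hg
      have hstep0 : pvB_step sq (PySem.Dict.empty, none, [], false) t0
          = (PySem.Dict.empty, some (PySem.Str.slice t0 (some 1) none), [], false) := by
        simp [pvB_step, hg0]
      rw [List.foldl_cons, hstep0,
        pvOuter_sim sq ((t0 :: rest).length + 1) (t0 :: rest) 0 PySem.Dict.empty (by omega)
          (by simp) (by simpa using hg)]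
      simp
  · rw [if_neg hg, if_pos (by simpa using hg)]
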